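-- pv_equiv track=rewrite | github.com/MarVinReisSantos/Exercicios-FrontEnd-CEFET | 4 Bimestre/Exercicio 1/codigo.py | indice_prim_valor_igual
-- ===== SOURCE A (Python) =====
-- def indice_prim_valor_igual(lista1,lista2):
--     """
--     Realiza a comparacao entre duas listas
--     retorna o indice do elemento igual
--     @author: Marcos Vinicius
--     """
--     x = -1
--     for elLista1 in lista1:
--         for elLista2 in lista2:
--             if elLista1==elLista2:
--                 x = lista1.index(elLista1)
--                 if x >= 0:
--                     return x
--
--     return None
-- ===== SOURCE B (Python) =====
-- def indice_prim_valor_igual(lista1, lista2):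
--     """Index lista1's first occurrences once, then one scan of lista2 taking the min."""
--     first = {}
--     for i, v in enumerate(lista1):
--         if v not in first:
--             first[v] = i
--     best = None
--     for v in lista2:
--         i = first.get(v)
--         if i is not None and (best is None or i < best):
--             best = i
--     return best
-- ===== Notes on version B (the rewrite author's own statement) =====
-- stated objective: alternative
-- what changed: B builds a dict of each value's first index in lista1 once and then makes a single pass over lista2 keeping a running minimum index, replacing A's nested membership scans of lista1 with early return.
import Mathlib
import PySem

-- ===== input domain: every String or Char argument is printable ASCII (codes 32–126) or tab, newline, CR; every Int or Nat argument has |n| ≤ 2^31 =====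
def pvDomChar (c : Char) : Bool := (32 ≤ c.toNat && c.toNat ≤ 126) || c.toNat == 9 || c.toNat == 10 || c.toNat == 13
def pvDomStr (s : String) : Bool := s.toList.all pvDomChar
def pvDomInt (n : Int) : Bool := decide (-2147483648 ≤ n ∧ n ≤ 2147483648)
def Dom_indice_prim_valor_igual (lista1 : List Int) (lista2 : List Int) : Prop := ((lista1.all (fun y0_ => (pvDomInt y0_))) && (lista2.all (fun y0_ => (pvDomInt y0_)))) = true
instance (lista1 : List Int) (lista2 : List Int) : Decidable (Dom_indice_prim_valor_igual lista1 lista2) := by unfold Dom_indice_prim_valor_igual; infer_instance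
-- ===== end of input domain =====

-- B builds a dict of first-occurrence indices of lista1 once, then scans lista2 once
-- keeping a running minimum index, instead of A's nested loops with early return.

-- ===== PORT A =====
-- inner 'for elLista2 in lista2' loop; some x = the 'return x' early exit, none = fell through
def aInner (lista1 : List Int) (elLista1 : Int) : List Int → Option Int
  | [] => none
  | elLista2 :: rest =>
    if elLista1 == elLista2 then
      match PySem.List.index? lista1 elLista1 with
      | some k =>
        if (k : Int) ≥ 0 then some (k : Int) else aInner lista1 elLista1 rest
      | none => none   -- ValueError branch; unreachable since elLista1 is drawn from lista1
    else aInner lista1 elLista1 rest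

-- outer 'for elLista1 in lista1' loop
def aOuter (lista1 lista2 : List Int) : List Int → Option Int
  | [] => none
  | elLista1 :: rest =>
    match aInner lista1 elLista1 lista2 with
    | some x => some x
    | none => aOuter lista1 lista2 rest

def indice_prim_valor_igual (lista1 : List Int) (lista2 : List Int) : Option Int :=
  aOuter lista1 lista2 lista1

-- ===== PORT B =====
-- B's 'for i, v in enumerate(lista1)' loop: record each value's first index
def bBuild : List Int → Int → PySem.Dict Int Int → PySem.Dict Int Int
  | [], _, first => first
  | v :: r, i, first =>
    bBuild r (i + 1) (if first.contains v then first else first.insert v i)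

-- body of B's 'for v in lista2' loop: i = first.get(v); update the running best index
def bScan (first : PySem.Dict Int Int) (best : Option Int) (v : Int) : Option Int :=
  match first.get? v with
  | some i =>
    match best with
    | none => some i
    | some b => if i < b then some i else some b
  | none => best

def indice_prim_valor_igual_alt (lista1 : List Int) (lista2 : List Int) : Option Int :=
  lista2.foldl (bScan (bBuild lista1 0 PySem.Dict.empty)) none

-- ===== PRECONDITION & SPEC =====
def Spec_indice_prim_valor_igual (lista1 : List Int) (lista2 : List Int) (out : Option Int) : Prop := out = indice_prim_valor_igual_alt lista1 lista2
instance (lista1 : List Int) (lista2 : List Int) (out : Option Int) : Decidable (Spec_indice_prim_valor_igual lista1 lista2 out) := by unfold Spec_indice_prim_valor_igual; infer_instance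

-- ===== CLAIM (what is proved, stated in full; the proofs are below) =====
def Claim_equal_indice_prim_valor_igual : Prop := ∀ (lista1 : List Int) (lista2 : List Int), Dom_indice_prim_valor_igual lista1 lista2 → Spec_indice_prim_valor_igual lista1 lista2 (indice_prim_valor_igual lista1 lista2)

-- ===== LEMMAS AND PROOFS =====

-- the common reference value: index of the first element of lista1 that occurs in lista2
def fspec (l1 l2 : List Int) : Option Int :=
  (List.findIdx? (fun a => decide (a ∈ l2)) l1).map (fun k => (k : Int))

def gfun (l1 : List Int) (v : Int) : Option Int :=
  (List.idxOf? v l1).map (fun k => (k : Int))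

def optMin : Option Int → Option Int → Option Int
  | none, b => b
  | some x, none => some x
  | some x, some y => some (min x y)

def mmin (l1 : List Int) : List Int → Option Int
  | [] => none
  | v :: r => optMin (gfun l1 v) (mmin l1 r)

theorem index?_prefix (p q : List Int) (a : Int) (h : a ∉ p) :
    PySem.List.index? (p ++ a :: q) a = some p.length :=
  (PySem.List.index?_eq_some_iff _ _ _).mpr ⟨p, q, rfl, rfl, h⟩

theorem aInner_eq (l1 : List Int) (e : Int) (he : e ∈ l1) (l2 : List Int) :
    aInner l1 e l2 = if e ∈ l2 then (PySem.List.index? l1 e).map (fun k => (k : Int)) else none := by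
  induction l2 with
  | nil => simp [aInner]
  | cons c r ih =>
    by_cases hec : e = c
    · subst hec
      rcases Option.isSome_iff_exists.mp ((PySem.List.index?_isSome_iff l1 e).mpr he) with ⟨k, hk⟩
      rw [PySem.List.index?_eq_idxOf?] at hk
      simp [aInner, hk]
    · simp [aInner, hec, ih]

theorem findIdx?_prefix (P : Int → Bool) (e : Int) (q : List Int) (hP : P e = true) :
    ∀ p : List Int, (∀ a ∈ p, P a = false) → List.findIdx? P (p ++ e :: q) = some p.length := by
  intro p
  induction p with
  | nil => intro _; simp [List.findIdx?_cons, hP]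
  | cons a t ih =>
    intro hp
    have ha : P a = false := hp a (by simp)
    simp [List.findIdx?_cons, ha, ih (fun b hb => hp b (by simp [hb]))]

theorem aOuter_eq (l2 : List Int) :
    ∀ (s p : List Int), (∀ a ∈ p, a ∉ l2) → aOuter (p ++ s) l2 s = fspec (p ++ s) l2 := by
  intro s
  induction s with
  | nil =>
    intro p hp
    have : List.findIdx? (fun a => decide (a ∈ l2)) p = none :=
      List.findIdx?_eq_none_iff.mpr (fun x hx => by simp [hp x hx])
    simp [aOuter, fspec, this]
  | cons e rest ih =>
    intro p hp
    have he1 : e ∈ p ++ e :: rest := by simp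
    by_cases he2 : e ∈ l2
    · have hep : e ∉ p := fun h => hp e h he2
      have hfi : List.findIdx? (fun a => decide (a ∈ l2)) (p ++ e :: rest) = some p.length :=
        findIdx?_prefix _ e rest (by simp [he2]) p (fun a ha => by simp [hp a ha])
      have hidx := index?_prefix p rest e hep
      rw [PySem.List.index?_eq_idxOf?] at hidx
      simp [aOuter, aInner_eq _ _ he1, he2, hidx, fspec, hfi]
    · have hstep : p ++ e :: rest = (p ++ [e]) ++ rest := by simp
      have hp' : ∀ a ∈ p ++ [e], a ∉ l2 := by
        intro a ha
        rcases List.mem_append.mp ha with h | h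
        · exact hp a h
        · simp at h; subst h; exact he2
      calc aOuter (p ++ e :: rest) l2 (e :: rest)
          = aOuter (p ++ e :: rest) l2 rest := by
            simp [aOuter, aInner_eq _ _ he1, he2]
        _ = fspec (p ++ e :: rest) l2 := by rw [hstep]; exact ih (p ++ [e]) hp'

theorem a_eq_fspec (l1 l2 : List Int) : indice_prim_valor_igual l1 l2 = fspec l1 l2 := by
  have := aOuter_eq l2 l1 [] (by simp)
  simpa [indice_prim_valor_igual] using this

theorem bBuild_get? (v : Int) : ∀ (l : List Int) (i : Int) (d : PySem.Dict Int Int),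
    (bBuild l i d).get? v = (d.get? v).or ((List.idxOf? v l).map (fun k : Nat => (k : Int) + i)) := by
  intro l
  induction l with
  | nil => intro i d; simp [bBuild]
  | cons v' r ih =>
    intro i d
    have hmaps : ((List.idxOf? v r).map (fun x => x + 1)).map (fun k : Nat => (k : Int) + i)
        = (List.idxOf? v r).map (fun k : Nat => (k : Int) + (i + 1)) := by
      rw [Option.map_map]
      congr 1
      funext k
      simp
      ring
    by_cases hvv : v' = v
    · rw [hvv]
      cases hdg : d.get? v with
      | some w =>
        have hc : d.contains v = true := by
          rw [PySem.Dict.contains_eq_isSome_get?, hdg]; rfl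
        simp [bBuild, hc, ih, hdg, Option.or]
      | none =>
        have hc : d.contains v = false := by
          rw [PySem.Dict.contains_eq_isSome_get?, hdg]; rfl
        simp [bBuild, hc, ih, PySem.Dict.get?_insert_self, List.idxOf?_cons, Option.or]
    · have hne : v ≠ v' := Ne.symm hvv
      have hd' : (if d.contains v' then d else d.insert v' i).get? v = d.get? v := by
        split
        · rfl
        · exact PySem.Dict.get?_insert_of_ne d i hne
      calc (bBuild (v' :: r) i d).get? v
          = (bBuild r (i + 1) (if d.contains v' then d else d.insert v' i)).get? v := rfl
        _ = ((if d.contains v' then d else d.insert v' i).get? v).or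
              ((List.idxOf? v r).map (fun k : Nat => (k : Int) + (i + 1))) := ih _ _
        _ = (d.get? v).or
              (((List.idxOf? v r).map (fun x => x + 1)).map (fun k : Nat => (k : Int) + i)) := by
            rw [hd', hmaps]
        _ = (d.get? v).or ((List.idxOf? v (v' :: r)).map (fun k : Nat => (k : Int) + i)) := by
            rw [List.idxOf?_cons, if_neg (by simp [hvv])]

theorem bBuild_eq_gfun (l1 : List Int) (v : Int) :
    (bBuild l1 0 PySem.Dict.empty).get? v = gfun l1 v := by
  rw [bBuild_get? v l1 0 PySem.Dict.empty, PySem.Dict.get?_empty, gfun]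
  cases List.idxOf? v l1 <;> simp [Option.or]

theorem bScan_eq (first : PySem.Dict Int Int) (best : Option Int) (v : Int) :
    bScan first best v = optMin best (first.get? v) := by
  unfold bScan
  cases first.get? v with
  | none => cases best <;> simp [optMin]
  | some i =>
    cases best with
    | none => simp [optMin]
    | some b =>
      simp only [optMin]
      split_ifs with h <;> simp [min_def] <;> omega

theorem optMin_assoc (a b c : Option Int) : optMin (optMin a b) c = optMin a (optMin b c) := by
  cases a <;> cases b <;> cases c <;> simp [optMin, min_assoc]

theorem optMin_none (a : Option Int) : optMin a none = a := by cases a <;> simp [optMin]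

theorem b_fold (l1 : List Int) (first : PySem.Dict Int Int)
    (hG : ∀ v, first.get? v = gfun l1 v) : ∀ (l2 : List Int) (acc : Option Int),
    List.foldl (bScan first) acc l2 = optMin acc (mmin l1 l2) := by
  intro l2
  induction l2 with
  | nil => intro acc; simp [mmin, optMin_none]
  | cons v r ih =>
    intro acc
    calc List.foldl (bScan first) acc (v :: r)
        = optMin (bScan first acc v) (mmin l1 r) := ih _
      _ = optMin (optMin acc (gfun l1 v)) (mmin l1 r) := by rw [bScan_eq, hG]
      _ = optMin acc (mmin l1 (v :: r)) := by rw [optMin_assoc]; rfl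

theorem mmin_none (l1 : List Int) : ∀ l2 : List Int, (∀ v ∈ l2, gfun l1 v = none) → mmin l1 l2 = none := by
  intro l2
  induction l2 with
  | nil => intro _; rfl
  | cons v r ih =>
    intro h
    simp [mmin, h v (by simp), ih (fun x hx => h x (by simp [hx])), optMin]

theorem mmin_lb (l1 : List Int) (j : Int) : ∀ l2 : List Int,
    (∀ v ∈ l2, ∀ k, gfun l1 v = some k → j ≤ k) →
    ∀ m, mmin l1 l2 = some m → j ≤ m := by
  intro l2
  induction l2 with
  | nil => intro _ m h; simp [mmin] at h
  | cons v r ih =>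
    intro hlb m hm
    have ihr := ih (fun x hx k hk => hlb x (by simp [hx]) k hk)
    cases hg : gfun l1 v with
    | none =>
      cases hr : mmin l1 r with
      | none => simp [mmin, hg, hr, optMin] at hm
      | some m' => simp [mmin, hg, hr, optMin] at hm; subst hm; exact ihr m' hr
    | some k =>
      have hjk := hlb v (by simp) k hg
      cases hr : mmin l1 r with
      | none => simp [mmin, hg, hr, optMin] at hm; omega
      | some m' =>
        have := ihr m' hr
        simp [mmin, hg, hr, optMin] at hm
        rcases min_cases k m' with ⟨h1, _⟩ | ⟨h1, _⟩ <;> omega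

theorem mmin_attained (l1 : List Int) (j : Int) : ∀ l2 : List Int,
    (∀ v ∈ l2, ∀ k, gfun l1 v = some k → j ≤ k) →
    (∃ v ∈ l2, gfun l1 v = some j) →
    mmin l1 l2 = some j := by
  intro l2
  induction l2 with
  | nil => rintro _ ⟨v, hv, _⟩; simp at hv
  | cons v r ih =>
    rintro hlb ⟨v0, hv0, hg0⟩
    have hlbr : ∀ x ∈ r, ∀ k, gfun l1 x = some k → j ≤ k :=
      fun x hx k hk => hlb x (by simp [hx]) k hk
    rcases List.mem_cons.mp hv0 with h | h
    · subst h
      cases hr : mmin l1 r with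
      | none => simp [mmin, hg0, hr, optMin]
      | some m =>
        have := mmin_lb l1 j r hlbr m hr
        simp [mmin, hg0, hr, optMin, min_eq_left this]
    · have hr := ih hlbr ⟨v0, h, hg0⟩
      cases hg : gfun l1 v with
      | none => simp [mmin, hg, hr, optMin]
      | some k =>
        have := hlb v (by simp) k hg
        simp [mmin, hg, hr, optMin, min_eq_right this]

theorem mmin_eq_fspec (l1 l2 : List Int) : mmin l1 l2 = fspec l1 l2 := by
  cases hf : List.findIdx? (fun a => decide (a ∈ l2)) l1 with
  | none =>
    have hall : ∀ a ∈ l1, a ∉ l2 := by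
      intro a ha
      have := List.findIdx?_eq_none_iff.mp hf a ha
      simpa using this
    have : mmin l1 l2 = none := by
      apply mmin_none
      intro v hv
      have hvl : v ∉ l1 := fun h => hall v h hv
      simp [gfun, List.idxOf?_eq_none_iff.mpr hvl]
    simp [this, fspec, hf]
  | some j =>
    obtain ⟨hj, hpj, hmin⟩ := List.findIdx?_eq_some_iff_getElem.mp hf
    have hmem2 : l1[j] ∈ l2 := by simpa using hpj
    have hmem1 : l1[j] ∈ l1 := List.getElem_mem hj
    -- F2: every index produced by gfun is ≥ j
    have hlb : ∀ v ∈ l2, ∀ k, gfun l1 v = some k → (j : Int) ≤ k := by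
      intro v hv k hk
      unfold gfun at hk
      cases hidx : List.idxOf? v l1 with
      | none => simp [hidx] at hk
      | some k' =>
        have hidx' : PySem.List.index? l1 v = some k' := by
          rw [PySem.List.index?_eq_idxOf?]; exact hidx
        obtain ⟨hk', hget, _⟩ := PySem.List.getElem_of_index?_eq_some hidx'
        simp [hidx] at hk
        have : ¬ k' < j := by
          intro hlt
          exact (hmin k' hlt) (by simp [hget, hv])
        omega
    -- F1: gfun at l1[j] yields exactly j
    have hgj : gfun l1 (l1[j]) = some (j : Int) := by
      have hsplit : l1 = l1.take j ++ l1[j] :: l1.drop (j + 1) := by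
        rw [List.getElem_cons_drop, List.take_append_drop]
      have hnot : l1[j] ∉ l1.take j := by
        intro hmem
        obtain ⟨i, hi, hget⟩ := List.getElem_of_mem hmem
        have hij : i < j := lt_of_lt_of_le hi (by simp)
        have : l1[i] = l1[j] := by
          have := hget
          rwa [List.getElem_take] at this
        exact (hmin i hij) (by simp [this, hmem2])
      have hidx : PySem.List.index? (l1.take j ++ l1[j] :: l1.drop (j + 1)) (l1[j])
          = some (l1.take j).length := index?_prefix _ _ _ hnot
      rw [← hsplit] at hidx
      rw [PySem.List.index?_eq_idxOf?] at hidx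
      have hlen : (l1.take j).length = j := by simp [le_of_lt hj]
      simp [gfun, hidx, hlen]
    have := mmin_attained l1 (j : Int) l2 hlb ⟨l1[j], hmem2, hgj⟩
    simp [this, fspec, hf]

theorem b_eq_fspec (l1 l2 : List Int) : indice_prim_valor_igual_alt l1 l2 = fspec l1 l2 := by
  unfold indice_prim_valor_igual_alt
  rw [b_fold l1 _ (bBuild_eq_gfun l1) l2 none]
  simpa [optMin] using mmin_eq_fspec l1 l2

-- ===== VERDICT (by name: the statement is the Claim_ definition above) =====
theorem indice_prim_valor_igual_spec : Claim_equal_indice_prim_valor_igual := by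
  intro l1 l2 _
  unfold Spec_indice_prim_valor_igual
  rw [a_eq_fspec, b_eq_fspec]
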